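-- pv_equiv track=rewrite | github.com/mihiryerande/project-euler-033 | main.py | is_curious
-- ===== SOURCE A (Python) =====
-- def is_curious(numerator: int, denominator: int) -> bool:
--     """
--     Returns True iff the fraction (`numerator`/`denominator`) is 'curious'
--
--     Args:
--         numerator   (int): Double-digit natural number
--         denominator (int): Double-digit natural number, greater than `numerator`
--
--     Returns:
--         (bool): True iff (`numerator`/`denominator`) is 'curious'
--
--     Raises:
--         AssertError: if incorrect args are given
--     """
--     assert type(numerator) == int and 9 < numerator < 100
--     assert type(denominator) == int and 10 < denominator < 100
--     assert denominator > numerator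
--
--     # Find common digit(s)
--     num_digits = set(map(int, list(str(numerator))))
--     den_digits = set(map(int, list(str(denominator))))
--     common_digits = num_digits.intersection(den_digits)
--
--     # Check if removal of this digit keeps fraction the same
--     for d in common_digits:
--         # Get new fraction by removing common digit
--         num_new = list(str(numerator))
--         num_new.remove(str(d))
--         num_new = int(''.join(num_new))
--         den_new = list(str(denominator))
--         den_new.remove(str(d))
--         den_new = int(''.join(den_new))
--
--         # Check if new fraction equals original
--         if num_new * denominator == den_new * numerator:
--             return True
--     return False
-- ===== SOURCE B (Python) =====
-- def is_curious(numerator: int, denominator: int) -> bool: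
--     assert type(numerator) == int and 9 < numerator < 100
--     assert type(denominator) == int and 10 < denominator < 100
--     assert denominator > numerator
--     tn, un = divmod(numerator, 10)
--     td, ud = divmod(denominator, 10)
--     for removed_n, kept_n in ((tn, un), (un, tn)):
--         for removed_d, kept_d in ((td, ud), (ud, td)):
--             if removed_n == removed_d and kept_n * denominator == kept_d * numerator:
--                 return True
--     return False
-- ===== Notes on version B (the rewrite author's own statement) =====
-- stated objective: alternative
-- what changed: Replaces A's string/set pipeline (str(), per-char int(), digit-set intersection, list.remove, join, int()) by pure positional arithmetic: divmod digit extraction and an enumeration of the four (removed,kept) digit splits.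
import Mathlib
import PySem

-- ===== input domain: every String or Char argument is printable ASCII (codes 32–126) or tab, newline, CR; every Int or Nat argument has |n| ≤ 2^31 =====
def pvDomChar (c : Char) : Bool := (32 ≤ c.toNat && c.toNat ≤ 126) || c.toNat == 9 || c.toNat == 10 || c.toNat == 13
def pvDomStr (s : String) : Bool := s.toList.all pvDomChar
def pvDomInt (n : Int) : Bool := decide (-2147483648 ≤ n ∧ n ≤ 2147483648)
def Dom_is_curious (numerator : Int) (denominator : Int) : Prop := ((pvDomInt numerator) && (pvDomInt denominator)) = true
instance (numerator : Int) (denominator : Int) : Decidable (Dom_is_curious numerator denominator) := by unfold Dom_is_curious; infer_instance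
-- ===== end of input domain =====

-- B replaces A's string/set pipeline by pure positional arithmetic (divmod digit
-- extraction and an enumeration of the four removed/kept splits): objective 'alternative'.

-- ===== PORT A =====
-- int(c) for a single character, as A applies int to each char of str(n);
-- inside Pre_ every such char is a digit, so the .getD 0 default is never used.
def pvCharInt (c : Char) : Int := (PySem.Int.ofChars? [c]).getD 0

-- list(str(n)).remove(str(d)); int(''.join(...)). Inside Pre_ the removed digit is
-- present (d is a common digit) and the remaining string is a digit, so the
-- defaults are never used.
def pvRemoveJoinInt (l : List Char) (d : Int) : Int :=
  (PySem.Int.ofChars? ((PySem.List.remove? l (Char.ofNat (48 + d.toNat))).getD [])).getD 0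

def is_curious (numerator : Int) (denominator : Int) : Bool :=
  -- the three asserts reject inputs outside Pre_is_curious (AssertionError)
  let num_digits : PySem.Set Int := PySem.Set.ofList ((PySem.Int.toChars numerator).map pvCharInt)
  let den_digits : PySem.Set Int := PySem.Set.ofList ((PySem.Int.toChars denominator).map pvCharInt)
  let common_digits := PySem.Set.inter num_digits den_digits
  -- for d in common_digits: … if …: return True / return False  =  List.any
  common_digits.any (fun d =>
    let num_new := pvRemoveJoinInt (PySem.Int.toChars numerator) d
    let den_new := pvRemoveJoinInt (PySem.Int.toChars denominator) d
    num_new * denominator == den_new * numerator)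

-- ===== PORT B =====
def is_curious_alt (numerator : Int) (denominator : Int) : Bool :=
  let tn := PySem.Int.floordiv numerator 10
  let un := PySem.Int.mod numerator 10
  let td := PySem.Int.floordiv denominator 10
  let ud := PySem.Int.mod denominator 10
  [(tn, un), (un, tn)].any (fun nk =>
    [(td, ud), (ud, td)].any (fun dk =>
      nk.1 == dk.1 && nk.2 * denominator == dk.2 * numerator))

-- ===== PRECONDITION & SPEC =====
-- Pre_ = exactly the inputs passing A's three asserts; elsewhere A raises AssertionError.
def Pre_is_curious (numerator : Int) (denominator : Int) : Prop :=
  9 < numerator ∧ numerator < 100 ∧ 11 ≤ denominator ∧ denominator < 100 ∧ numerator < denominator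
instance (numerator : Int) (denominator : Int) : Decidable (Pre_is_curious numerator denominator) := by
  unfold Pre_is_curious; infer_instance

def pvWitness_is_curious : Int × Int := (26, 65)

def Spec_is_curious (numerator : Int) (denominator : Int) (out : Bool) : Prop := out = is_curious_alt numerator denominator
instance (numerator : Int) (denominator : Int) (out : Bool) : Decidable (Spec_is_curious numerator denominator out) := by unfold Spec_is_curious; infer_instance

-- ===== CLAIM (what is proved, stated in full; the proofs are below) =====
def Claim_equal_is_curious : Prop := ∀ (numerator : Int) (denominator : Int), Dom_is_curious numerator denominator → Pre_is_curious numerator denominator → Spec_is_curious numerator denominator (is_curious numerator denominator)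

-- ===== LEMMAS AND PROOFS =====

-- exhaustive check of the (finite) precondition domain
theorem pv_exhaustive :
    ((List.range 90).all fun a => (List.range 89).all fun b =>
      let n : Int := 10 + a
      let d : Int := 11 + b
      !(decide (n < d)) || (is_curious n d == is_curious_alt n d)) = true := by
  decide

-- ===== VERDICT (by name: the statement is the Claim_ definition above) =====
theorem is_curious_spec : Claim_equal_is_curious := by
  intro n d _ hpre
  obtain ⟨h1, h2, h3, h4, h5⟩ := hpre
  have ha : (n - 10).toNat ∈ List.range 90 := by
    simp [List.mem_range]; omega
  have hb : (d - 11).toNat ∈ List.range 89 := by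
    simp [List.mem_range]; omega
  have h := List.all_eq_true.mp pv_exhaustive _ ha
  have h' := List.all_eq_true.mp h _ hb
  have hn : (10 : Int) + (n - 10).toNat = n := by omega
  have hd : (11 : Int) + (d - 11).toNat = d := by omega
  rw [hn, hd] at h'
  simp only [Bool.or_eq_true, Bool.not_eq_true', decide_eq_false_iff_not, beq_iff_eq] at h'
  rcases h' with h' | h'
  · omega
  · exact h'
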